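-- pv_equiv track=rewrite | github.com/pvpk1994/Leetcode_Medium | Python/Clan_Count.py | numberOfClans
-- ===== SOURCE A (Python) =====
-- def numberOfClans(divisors, k):
--     clans = [1]
--     def is_frnd(divisors, a, b):
--         for i in range(len(divisors)):
--             if not(a%divisors[i]==0 and b%divisors[i]==0) and not(a % divisors[i] !=0 and b % divisors[i] != 0):
--                 return False
--         return True
--     for i in range(2, k+1):
--         should_add = True
--         for clan in clans:
--             if is_frnd(divisors, clan, i):
--                 should_add = False
--                 break
--         if should_add:
--             clans.append(i)
--     return len(clans)
-- ===== SOURCE B (Python) =====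
-- def numberOfClans(divisors, k):
--     sigs = set()
--     for n in range(2, k + 1):
--         sigs.add(tuple(n % d == 0 for d in divisors))
--     # the clan of 1: 1 is divisible by d exactly when abs(d) == 1
--     sigs.add(tuple(abs(d) == 1 for d in divisors))
--     return len(sigs)
-- ===== Notes on version B (the rewrite author's own statement) =====
-- stated objective: faster
-- what changed: Instead of comparing each new number pairwise against every stored clan representative (recomputing every modulus per comparison), B computes each number's divisibility signature once and counts distinct signatures with a set.
-- outside the precondition, e.g. on numberOfClans([1, 2, 0, 0], 2): A returns 2, B raises ZeroDivisionError
import Mathlib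
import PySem

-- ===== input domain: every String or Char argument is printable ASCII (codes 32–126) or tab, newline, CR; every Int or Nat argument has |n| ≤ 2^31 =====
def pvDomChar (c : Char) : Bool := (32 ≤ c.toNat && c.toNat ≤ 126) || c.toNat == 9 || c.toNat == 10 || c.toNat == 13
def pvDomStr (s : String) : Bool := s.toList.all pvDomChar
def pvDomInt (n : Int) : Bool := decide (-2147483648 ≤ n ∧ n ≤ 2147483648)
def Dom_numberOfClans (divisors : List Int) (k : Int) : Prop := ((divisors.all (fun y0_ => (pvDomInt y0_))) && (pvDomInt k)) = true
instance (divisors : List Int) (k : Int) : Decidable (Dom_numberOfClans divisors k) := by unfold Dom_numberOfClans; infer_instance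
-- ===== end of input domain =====

-- B replaces A's pairwise clan comparison (each new number re-checked against every stored
-- representative) by computing each number's divisibility signature once and counting the
-- distinct signatures with a set: O(k*D) instead of O(k^2*D).

-- ===== PORT A =====
def isFrnd (divisors : List Int) (a b : Int) : Bool :=
  (PySem.List.pyRange 0 (PySem.List.len divisors)).all (fun i =>
    let d := PySem.List.pyGetD divisors i 0
    !((!(PySem.Int.mod a d == 0 && PySem.Int.mod b d == 0)) &&
      (!(!(PySem.Int.mod a d == 0) && !(PySem.Int.mod b d == 0)))))

def numberOfClans (divisors : List Int) (k : Int) : Int :=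
  let clans := (PySem.List.pyRange 2 (k + 1)).foldl
    (fun clans i =>
      if clans.any (fun clan => isFrnd divisors clan i) then clans else clans ++ [i])
    [(1 : Int)]
  (clans.length : Int)

-- ===== PORT B =====
def numberOfClans_alt (divisors : List Int) (k : Int) : Int :=
  let sigs : PySem.Set (List Bool) := (PySem.List.pyRange 2 (k + 1)).foldl
    (fun s n => PySem.Set.add s (divisors.map (fun d => PySem.Int.mod n d == 0)))
    PySem.Set.empty
  let sigs := PySem.Set.add sigs (divisors.map (fun d => d.natAbs == 1))
  (sigs.length : Int)

-- ===== PRECONDITION & SPEC =====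
-- Pre_ excludes inputs with a zero divisor and k ≥ 2 (modulo by zero): A raises ZeroDivisionError
-- on almost all of them and returns only when its short-circuit evaluation happens to skip the
-- zero divisor, while B always raises ZeroDivisionError there.
def Pre_numberOfClans (divisors : List Int) (k : Int) : Prop := (0 : Int) ∉ divisors ∨ k ≤ 1
instance (divisors : List Int) (k : Int) : Decidable (Pre_numberOfClans divisors k) := by unfold Pre_numberOfClans; infer_instance
def pvWitness_numberOfClans : List Int × Int := ([2, 3], 10)

def Spec_numberOfClans (divisors : List Int) (k : Int) (out : Int) : Prop := out = numberOfClans_alt divisors k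
instance (divisors : List Int) (k : Int) (out : Int) : Decidable (Spec_numberOfClans divisors k out) := by unfold Spec_numberOfClans; infer_instance

-- ===== CLAIM (what is proved, stated in full; the proofs are below) =====
def Claim_equal_numberOfClans : Prop := ∀ (divisors : List Int) (k : Int), Dom_numberOfClans divisors k → Pre_numberOfClans divisors k → Spec_numberOfClans divisors k (numberOfClans divisors k)

-- ===== LEMMAS AND PROOFS =====

-- the divisibility signature of n (proof-side name for what B computes)
def sigv (divisors : List Int) (n : Int) : List Bool :=
  divisors.map (fun d => PySem.Int.mod n d == 0)

theorem isFrnd_iff (divisors : List Int) (a b : Int) :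
    isFrnd divisors a b = true ↔ sigv divisors a = sigv divisors b := by
  unfold isFrnd sigv
  have h1 : (PySem.List.pyRange 0 (PySem.List.len divisors)).all (fun i =>
      let d := PySem.List.pyGetD divisors i 0
      !((!(PySem.Int.mod a d == 0 && PySem.Int.mod b d == 0)) &&
        (!(!(PySem.Int.mod a d == 0) && !(PySem.Int.mod b d == 0)))))
      = divisors.all (fun d =>
      !((!(PySem.Int.mod a d == 0 && PySem.Int.mod b d == 0)) &&
        (!(!(PySem.Int.mod a d == 0) && !(PySem.Int.mod b d == 0))))) := by
    conv_rhs => rw [← PySem.List.map_pyGetD_pyRange_zero divisors 0]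
    rw [List.all_map]
    rfl
  rw [h1]
  have h2 : ∀ d : Int,
      (!((!(PySem.Int.mod a d == 0 && PySem.Int.mod b d == 0)) &&
        (!(!(PySem.Int.mod a d == 0) && !(PySem.Int.mod b d == 0)))))
      = ((PySem.Int.mod a d == 0) == (PySem.Int.mod b d == 0)) := by
    intro d
    cases ha : (PySem.Int.mod a d == 0) <;> cases hb : (PySem.Int.mod b d == 0) <;> rfl
  simp only [h2]
  rw [List.map_eq_map_iff, List.all_eq_true]
  constructor
  · intro h d hd
    exact beq_iff_eq.mp (h d hd)
  · intro h d hd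
    exact beq_iff_eq.mpr (h d hd)

theorem mapped_fold (divisors : List Int) (R : List Int) : ∀ (clans : List Int),
    (R.foldl (fun clans i =>
        if clans.any (fun clan => isFrnd divisors clan i) then clans else clans ++ [i]) clans).map
      (sigv divisors)
    = R.foldl (fun s i => PySem.Set.add s (sigv divisors i)) (clans.map (sigv divisors)) := by
  induction R with
  | nil => intro clans; rfl
  | cons i R ih =>
    intro clans
    simp only [List.foldl_cons]
    rw [ih]
    congr 1
    by_cases h : sigv divisors i ∈ clans.map (sigv divisors)
    · have hany : clans.any (fun clan => isFrnd divisors clan i) = true := by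
        obtain ⟨c, hc, hceq⟩ := List.mem_map.mp h
        exact List.any_eq_true.mpr ⟨c, hc, (isFrnd_iff divisors c i).mpr hceq⟩
      rw [if_pos hany]
      simp [PySem.Set.add, h]
    · have hany : clans.any (fun clan => isFrnd divisors clan i) = false := by
        rw [List.any_eq_false]
        intro c hc hfr
        exact h (List.mem_map.mpr ⟨c, hc, ((isFrnd_iff divisors c i).mp hfr)⟩)
      rw [if_neg (by simp [hany])]
      simp [PySem.Set.add, h]

theorem toFinset_add (s : PySem.Set (List Bool)) (x : List Bool) :
    (PySem.Set.add s x).toFinset = insert x s.toFinset := by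
  by_cases h : x ∈ s
  · simp [PySem.Set.add, h, Finset.insert_eq_self.mpr (List.mem_toFinset.mpr h)]
  · simp [PySem.Set.add, h]

theorem fold_add_spec (L : List (List Bool)) : ∀ (s : PySem.Set (List Bool)), s.Nodup →
    (L.foldl PySem.Set.add s).Nodup ∧
      (L.foldl PySem.Set.add s).toFinset = s.toFinset ∪ L.toFinset := by
  induction L with
  | nil => intro s hs; simpa using hs
  | cons x L ih =>
    intro s hs
    simp only [List.foldl_cons]
    obtain ⟨h1, h2⟩ := ih (PySem.Set.add s x) (PySem.Set.nodup_add s x hs)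
    refine ⟨h1, ?_⟩
    rw [h2, toFinset_add]
    ext y
    simp [List.toFinset_cons]

theorem sig_one (divisors : List Int) :
    (divisors.map (fun d => d.natAbs == 1)) = sigv divisors 1 := by
  unfold sigv
  rw [List.map_eq_map_iff]
  intro d _
  have : (d.natAbs == 1) = true ↔ (PySem.Int.mod 1 d == 0) = true := by
    simp only [beq_iff_eq, PySem.Int.mod_eq_zero_iff_dvd, ← isUnit_iff_dvd_one,
      Int.isUnit_iff_natAbs_eq]
  cases hh : (d.natAbs == 1) <;> cases hm : (PySem.Int.mod 1 d == 0) <;>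
    simp [hh, hm] at this ⊢

-- ===== VERDICT (by name: the statement is the Claim_ definition above) =====
theorem numberOfClans_spec : Claim_equal_numberOfClans := by
  intro divisors k _ _
  unfold Spec_numberOfClans numberOfClans numberOfClans_alt
  set R := PySem.List.pyRange 2 (k + 1) with hR
  set clansF := R.foldl (fun clans i =>
      if clans.any (fun clan => isFrnd divisors clan i) then clans else clans ++ [i]) [(1 : Int)]
    with hclansF
  have hAmap : clansF.map (sigv divisors)
      = (R.map (sigv divisors)).foldl PySem.Set.add [sigv divisors 1] := by
    rw [hclansF, mapped_fold, List.foldl_map]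
    rfl
  have hBfold : (R.foldl (fun s n =>
        PySem.Set.add s (divisors.map (fun d => PySem.Int.mod n d == 0))) PySem.Set.empty)
      = (R.map (sigv divisors)).foldl PySem.Set.add [] := by
    rw [List.foldl_map]
    rfl
  set L := R.map (sigv divisors) with hL
  obtain ⟨hAnd, hAfs⟩ := fold_add_spec L [sigv divisors 1] (by simp)
  obtain ⟨hBnd, hBfs⟩ := fold_add_spec L [] (by simp)
  have hlenA : clansF.length = (L.foldl PySem.Set.add [sigv divisors 1]).length := by
    rw [← hAmap, List.length_map]
  have hcardA : (clansF.length : Int)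
      = (((insert (sigv divisors 1) L.toFinset : Finset (List Bool))).card : Int) := by
    rw [hlenA, ← List.toFinset_card_of_nodup hAnd, hAfs]
    congr 2
  have hBadd : (PySem.Set.add (L.foldl PySem.Set.add []) (divisors.map (fun d => d.natAbs == 1))).length
      = ((insert (sigv divisors 1) L.toFinset : Finset (List Bool))).card := by
    have hnd2 := PySem.Set.nodup_add (L.foldl PySem.Set.add []) (divisors.map (fun d => d.natAbs == 1)) hBnd
    rw [← List.toFinset_card_of_nodup hnd2, toFinset_add, sig_one, hBfs]
    congr 1
  rw [hcardA]
  show ((insert (sigv divisors 1) L.toFinset).card : Int)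
      = ((PySem.Set.add (R.foldl (fun s n =>
            PySem.Set.add s (divisors.map (fun d => PySem.Int.mod n d == 0))) PySem.Set.empty)
          (divisors.map (fun d => d.natAbs == 1))).length : Int)
  rw [hBfold, hBadd]
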